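-- pv_equiv track=rewrite | github.com/Capra05/Tp2_AED-Equipo-Capra | 2025_TP2_G385_Capra_420388_Paredes_417335_Barrios_420073_Davide_419708.py | invalida
-- ===== SOURCE A (Python) =====
-- def es_mayuscula(c):
--     return c in "ABCDEFGHIJKLMNÑOPQRSTUVWXYZ"
--
-- def es_digito(c):
--     return c in "1234567890"
--
-- def invalida(cadena):
--     mensaje_error = "Destinatario mal identificado"
--     for c in cadena:
--         if not (es_mayuscula(c) or es_digito(c) or c == '-'):
--             return True, mensaje_error
--
--     if all(c == '-' for c in cadena):
--         return True, mensaje_error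
--
--     return False, None
-- ===== SOURCE B (Python) =====
-- UPPERS_DIGITS = "ABCDEFGHIJKLMN\u00d1OPQRSTUVWXYZ1234567890"
-- _DEL_ALLOWED = str.maketrans('', '', UPPERS_DIGITS + '-')
-- _DEL_DASH = str.maketrans('', '', '-')
--
-- def invalida(cadena):
--     # Filter-and-test-the-residue: delete every allowed character; any residue
--     # means a bad character.  Delete every dash; an empty residue means the
--     # string was all dashes (or empty).
--     if cadena.translate(_DEL_ALLOWED) or not cadena.translate(_DEL_DASH):
--         return True, "Destinatario mal identificado"
--     return False, None
-- ===== Notes on version B (the rewrite author's own statement) =====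
-- stated objective: alternative
-- what changed: Replaces A's early-exit predicate scan plus a second all()-pass by character deletion (str.translate): delete the allowed alphabet and test for a residue (bad character present), delete dashes and test for emptiness (all-dash or empty string).
import Mathlib
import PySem

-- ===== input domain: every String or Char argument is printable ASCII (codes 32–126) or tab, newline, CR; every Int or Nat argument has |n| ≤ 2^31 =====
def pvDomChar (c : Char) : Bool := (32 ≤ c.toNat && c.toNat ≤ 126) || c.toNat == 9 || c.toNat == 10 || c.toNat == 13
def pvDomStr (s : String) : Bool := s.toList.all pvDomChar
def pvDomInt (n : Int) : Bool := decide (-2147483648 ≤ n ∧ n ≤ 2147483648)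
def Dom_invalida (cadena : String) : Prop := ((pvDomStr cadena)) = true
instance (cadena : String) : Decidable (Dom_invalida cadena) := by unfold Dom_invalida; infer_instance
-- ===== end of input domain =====

-- B replaces A's early-exit predicate scan plus second all()-pass by character deletion
-- (str.translate) and residue tests (objective: alternative).

-- ===== PORT A =====
def es_mayuscula (c : Char) : Bool := "ABCDEFGHIJKLMNÑOPQRSTUVWXYZ".toList.contains c

def es_digito (c : Char) : Bool := "1234567890".toList.contains c

-- the 'for c in cadena' loop with its early return; some r = 'return r', none = loop fell through
def invalidaLoop : List Char → Option (Bool × Option String)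
  | [] => none
  | c :: cs =>
    if !(es_mayuscula c || es_digito c || c == '-') then
      some (true, some "Destinatario mal identificado")
    else invalidaLoop cs

def invalida (cadena : String) : Bool × Option String :=
  match invalidaLoop cadena.toList with
  | some r => r
  | none =>
    if cadena.toList.all (fun c => c == '-') then
      (true, some "Destinatario mal identificado")
    else (false, none)

-- ===== PORT B =====
def UPPERS_DIGITS : List Char := "ABCDEFGHIJKLMNÑOPQRSTUVWXYZ1234567890".toList

-- str.translate with a deletion-only table (str.maketrans('', '', del)) removes exactly
-- the characters of del; ported as a filter over the characters (exact for deletion tables)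
def pyTranslateDelete (s : String) (del : List Char) : List Char :=
  s.toList.filter (fun c => !del.contains c)

def invalida_alt (cadena : String) : Bool × Option String :=
  if !(pyTranslateDelete cadena (UPPERS_DIGITS ++ ['-'])).isEmpty
      || (pyTranslateDelete cadena ['-']).isEmpty then
    (true, some "Destinatario mal identificado")
  else (false, none)

-- ===== PRECONDITION & SPEC =====
def Spec_invalida (cadena : String) (out : Bool × Option String) : Prop := out = invalida_alt cadena
instance (cadena : String) (out : Bool × Option String) : Decidable (Spec_invalida cadena out) := by unfold Spec_invalida; infer_instance

-- ===== CLAIM (what is proved, stated in full; the proofs are below) =====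
def Claim_equal_invalida : Prop := ∀ (cadena : String), Dom_invalida cadena → Spec_invalida cadena (invalida cadena)

-- ===== LEMMAS AND PROOFS =====

-- Char's == is decide of = (used to align A's == tests with membership decides)
lemma char_beq_decide (c d : Char) : (c == d) = decide (c = d) := by
  by_cases h : c = d <;> simp [h]

-- a character passes A's test iff it is in B's deletion alphabet
lemma good_iff_allowed (c : Char) :
    (es_mayuscula c || es_digito c || c == '-') = (UPPERS_DIGITS ++ ['-']).contains c := by
  have h : UPPERS_DIGITS ++ ['-']
      = "ABCDEFGHIJKLMNÑOPQRSTUVWXYZ".toList ++ ("1234567890".toList ++ ['-']) := by decide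
  simp [es_mayuscula, es_digito, h, char_beq_decide, Bool.or_assoc]

-- A's loop falls through iff every character is in the deletion alphabet,
-- i.e. iff deleting the alphabet leaves nothing
lemma invalidaLoop_eq (L : List Char) :
    invalidaLoop L = if (L.filter (fun c => !(UPPERS_DIGITS ++ ['-']).contains c)).isEmpty
                     then none
                     else some (true, some "Destinatario mal identificado") := by
  induction L with
  | nil => simp [invalidaLoop]
  | cons c cs ih =>
    simp only [invalidaLoop, good_iff_allowed, List.filter_cons]
    cases h : (UPPERS_DIGITS ++ ['-']).contains c with
    | true => simp [ih]
    | false => simp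

-- all-dash iff deleting dashes leaves nothing
lemma allDash_iff_filter (L : List Char) :
    (L.all (fun c => c == '-')) = (L.filter (fun c => !(['-'].contains c))).isEmpty := by
  induction L with
  | nil => simp
  | cons c cs ih =>
    simp only [List.all_cons, List.filter_cons, ih]
    by_cases h : c = '-' <;> simp [h, char_beq_decide]

-- ===== VERDICT (by name: the statement is the Claim_ definition above) =====
theorem invalida_spec : Claim_equal_invalida := by
  intro cadena _
  unfold Spec_invalida invalida invalida_alt pyTranslateDelete
  rw [invalidaLoop_eq, allDash_iff_filter]
  cases h1 : (List.filter (fun c => !(UPPERS_DIGITS ++ ['-']).contains c) cadena.toList).isEmpty with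
  | false => simp
  | true =>
    cases h2 : (List.filter (fun c => !(['-'].contains c)) cadena.toList).isEmpty with
    | true => simp
    | false => simp
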